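-- pv_equiv track=rewrite | github.com/shreyas-garg/WebScraper | main.py | int_extractor
-- ===== SOURCE A (Python) =====
-- def int_extractor(string):
--     int_string = ""
--
--     for ch in string:
--         if ch == "." and int_string:
--             break
--
--         if not ch.isdigit():
--             continue
--
--         int_string += ch
--
--     return int(int_string)
-- ===== SOURCE B (Python) =====
-- def int_extractor(string):
--     # pass 1: boundary of the leading digit-free part
--     i = 0
--     while i < len(string) and not string[i].isdigit():
--         i += 1
--     head, tail = string[:i], string[i:]
--     # pass 2: cut the tail at the first '.' (a dot before the first digit never cuts)
--     body = tail.split('.', 1)[0]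
--     # pass 3: keep the digits
--     return int(''.join(c for c in head + body if c.isdigit()))
-- ===== Notes on version B (the rewrite author's own statement) =====
-- stated objective: alternative
-- what changed: Replaced A's single interleaved loop (accumulator + conditional break) by three separate passes: find the first digit, cut the string at the first dot after it, then filter digits and convert.
-- outside the precondition, e.g. on int_extractor(''): A raises ValueError, B raises ValueError
import Mathlib
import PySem

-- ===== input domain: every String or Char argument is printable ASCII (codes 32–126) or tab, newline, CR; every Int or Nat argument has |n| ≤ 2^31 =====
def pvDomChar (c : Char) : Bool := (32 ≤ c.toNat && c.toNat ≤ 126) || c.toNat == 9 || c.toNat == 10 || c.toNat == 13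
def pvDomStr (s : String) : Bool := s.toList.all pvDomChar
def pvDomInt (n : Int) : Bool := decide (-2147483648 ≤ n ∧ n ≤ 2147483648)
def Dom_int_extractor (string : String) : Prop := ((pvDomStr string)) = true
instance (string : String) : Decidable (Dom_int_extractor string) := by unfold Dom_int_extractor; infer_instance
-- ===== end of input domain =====

-- B cuts the string up front (first digit, then first dot after it) and filters digits in one
-- final pass, instead of A's single interleaved loop; equivalence on strings containing a digit.

-- ===== PORT A =====
-- A's for-loop: accumulator int_string, break at '.' once nonempty, skip non-digits.
def intExtractorLoopA : List Char → List Char → List Char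
  | [], acc => acc
  | c :: r, acc =>
    if c = '.' ∧ acc ≠ [] then acc
    else if ¬ (PySem.Chars.isdigit c = true) then intExtractorLoopA r acc
    else intExtractorLoopA r (acc ++ [c])

def int_extractor (string : String) : Int :=
  (PySem.Int.ofChars? (intExtractorLoopA string.toList [])).getD 0

-- ===== PORT B =====
def int_extractor_alt (string : String) : Int :=
  let l := string.toList
  -- pass 1: the leading digit-free part (the while loop of Source B)
  let head := l.takeWhile (fun c => !(PySem.Chars.isdigit c))
  let tail := l.dropWhile (fun c => !(PySem.Chars.isdigit c))
  -- pass 2: tail.split('.', 1)[0]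
  let body := tail.takeWhile (fun c => c ≠ '.')
  -- pass 3: digits of head ++ body, then int(...)
  (PySem.Int.ofChars? ((head ++ body).filter PySem.Chars.isdigit)).getD 0

-- ===== PRECONDITION & SPEC =====
-- Pre_ excludes exactly the strings with no digit, on which Python's int('') raises ValueError.
def Pre_int_extractor (string : String) : Prop :=
  string.toList.any PySem.Chars.isdigit = true
instance (string : String) : Decidable (Pre_int_extractor string) := by
  unfold Pre_int_extractor; infer_instance

def pvWitness_int_extractor : String := "a1.2"

def Spec_int_extractor (string : String) (out : Int) : Prop := out = int_extractor_alt string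
instance (string : String) (out : Int) : Decidable (Spec_int_extractor string out) := by unfold Spec_int_extractor; infer_instance

-- ===== CLAIM (what is proved, stated in full; the proofs are below) =====
def Claim_equal_int_extractor : Prop := ∀ (string : String), Dom_int_extractor string → Pre_int_extractor string → Spec_int_extractor string (int_extractor string)

-- ===== LEMMAS AND PROOFS =====

theorem intExtractorLoopA_ne_nil (l acc : List Char) (h : acc ≠ []) :
    intExtractorLoopA l acc =
      acc ++ (l.takeWhile (fun c => c ≠ '.')).filter PySem.Chars.isdigit := by
  induction l generalizing acc with
  | nil => simp [intExtractorLoopA]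
  | cons c r ih =>
    by_cases hdot : c = '.'
    · subst hdot
      simp [intExtractorLoopA, h, PySem.Chars.isdigit]
    · by_cases hd : PySem.Chars.isdigit c = true
      · have : acc ++ [c] ≠ [] := by simp
        simp [intExtractorLoopA, hdot, hd, ih _ this]
      · simp [intExtractorLoopA, hdot, hd, ih _ h]

theorem intExtractorLoopA_nil (l : List Char) :
    intExtractorLoopA l [] =
      ((l.dropWhile (fun c => !(PySem.Chars.isdigit c))).takeWhile
        (fun c => c ≠ '.')).filter PySem.Chars.isdigit := by
  induction l with
  | nil => simp [intExtractorLoopA]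
  | cons c r ih =>
    by_cases hd : PySem.Chars.isdigit c = true
    · have hdot : c ≠ '.' := by
        intro h; subst h; simp [PySem.Chars.isdigit] at hd
      have : ([] : List Char) ++ [c] ≠ [] := by simp
      simp [intExtractorLoopA, hdot, hd, List.dropWhile_cons, List.takeWhile_cons,
        intExtractorLoopA_ne_nil r [c] (by simp)]
    · simp [intExtractorLoopA, hd, ih, List.dropWhile_cons]

theorem filter_takeWhile_not_digit (l : List Char) :
    (l.takeWhile (fun c => !(PySem.Chars.isdigit c))).filter PySem.Chars.isdigit = [] := by
  rw [List.filter_eq_nil_iff]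
  intro c hc
  have := List.mem_takeWhile_imp hc
  simpa using this

-- ===== VERDICT (by name: the statement is the Claim_ definition above) =====
theorem int_extractor_spec : Claim_equal_int_extractor := by
  intro s _ _
  unfold Spec_int_extractor int_extractor int_extractor_alt
  simp only [intExtractorLoopA_nil, List.filter_append, filter_takeWhile_not_digit,
    List.nil_append]
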